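-- pv_equiv track=rewrite | github.com/0-ft/crypto2 | impls/utils.py | solve_modular_system
-- ===== SOURCE A (Python) =====
-- def solve_modular_system(equations, modulo):
--     def add_row(row1, row2, factor):
--         return [(a + factor * b) % modulo for a, b in zip(row1, row2)]
--
--     def scale_row(row, factor):
--         return [a * factor % modulo for a in row]
--
--     def get_inv(num):
--         return pow(num, -1, modulo)
--
--     n = len(equations)
--     matrix = [eq[1] + [eq[0]] for eq in equations]
--
--     # Forward elimination
--     for i in range(n):
--         inv = get_inv(matrix[i][i])
--         matrix[i] = scale_row(matrix[i], inv)
--         for j in range(i + 1, n):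
--             matrix[j] = add_row(matrix[j], matrix[i], -matrix[j][i])
--
--     # Backward substitution
--     for i in range(n - 1, -1, -1):
--         for j in range(i - 1, -1, -1):
--             matrix[j] = add_row(matrix[j], matrix[i], -matrix[j][i])
--
--     return [row[-1] for row in matrix]
-- ===== SOURCE B (Python) =====
-- def solve_modular_system(equations, modulo):
--     def add_row(row1, row2, factor):
--         return [(a + factor * b) % modulo for a, b in zip(row1, row2)]
--
--     def scale_row(row, factor):
--         return [a * factor % modulo for a in row]
--
--     def get_inv(num):
--         return pow(num, -1, modulo)
--
--     n = len(equations)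
--     matrix = [eq[1] + [eq[0]] for eq in equations]
--
--     # Forward elimination (identical pivot order, so failures match A's)
--     for i in range(n):
--         inv = get_inv(matrix[i][i])
--         matrix[i] = scale_row(matrix[i], inv)
--         for j in range(i + 1, n):
--             matrix[j] = add_row(matrix[j], matrix[i], -matrix[j][i])
--
--     # Back-substitution instead of a second elimination pass
--     xs = []
--     for row in reversed(matrix):
--         s = row[-1]
--         for c, x in zip(row[n - len(xs):n], xs):
--             s -= c * x
--         xs = [s % modulo] + xs
--     return xs
-- ===== Notes on version B (the rewrite author's own statement) =====
-- stated objective: alternative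
-- what changed: B keeps A's forward elimination (same pivot order, so it raises exactly where A does) but replaces A's second full row-elimination pass over whole rows with back-substitution that reads only the constant column, solving x_i = (row_i[-1] - sum c_ij x_j) % modulo from the bottom up
-- outside the precondition, e.g. on solve_modular_system([(1, [1, 0, 0]), (2, [0, 1])], 7): A returns [0, 2], B returns [1, 2]
import Mathlib
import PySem

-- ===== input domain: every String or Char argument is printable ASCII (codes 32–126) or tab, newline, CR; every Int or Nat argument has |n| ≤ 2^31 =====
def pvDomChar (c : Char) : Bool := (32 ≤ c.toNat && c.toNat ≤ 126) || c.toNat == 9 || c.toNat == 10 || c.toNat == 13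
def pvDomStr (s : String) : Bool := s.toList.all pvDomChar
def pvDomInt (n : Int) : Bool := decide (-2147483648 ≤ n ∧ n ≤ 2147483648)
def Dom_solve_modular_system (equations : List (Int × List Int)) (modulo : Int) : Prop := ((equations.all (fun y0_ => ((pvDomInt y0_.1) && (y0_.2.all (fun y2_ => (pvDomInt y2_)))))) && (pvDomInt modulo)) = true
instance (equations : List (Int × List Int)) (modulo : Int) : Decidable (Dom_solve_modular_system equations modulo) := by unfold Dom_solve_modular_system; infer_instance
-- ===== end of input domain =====

-- B replaces A's second full row-elimination pass by back-substitution on the last column;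
-- the forward elimination (and hence where Python raises) is identical in both.
-- Equivalence is about the RETURN value (A mutates only its local matrix, no argument).

-- ===== PORT A =====
-- add_row(row1, row2, factor): [(a + factor*b) % modulo for a, b in zip(row1, row2)]
def pvAddRow (modulo : Int) (row1 row2 : List Int) (factor : Int) : List Int :=
  (row1.zip row2).map (fun ab => PySem.Int.mod (ab.1 + factor * ab.2) modulo)

-- scale_row(row, factor): [a * factor % modulo for a in row]
def pvScaleRow (modulo : Int) (row : List Int) (factor : Int) : List Int :=
  row.map (fun a => PySem.Int.mod (a * factor) modulo)

-- pow(num, -1, modulo), hand-ported (PySem.Int.powMod takes only Nat exponents):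
-- none exactly where Python raises (modulo = 0, or num not invertible); otherwise the
-- unique inverse in Python's % range, realised via the extended gcd Bézout coefficient.
def pvInvMod (num modulo : Int) : Option Int :=
  if modulo = 0 then none
  else if Int.gcd num modulo = 1 then some (PySem.Int.mod (Int.gcdA num modulo) modulo)
  else none

-- inner loop "for j in range(i+1, n): matrix[j] = add_row(matrix[j], matrix[i], -matrix[j][i])"
def pvElimBelow (modulo : Int) (i n j : Nat) (matrix : List (List Int)) : List (List Int) :=
  if j < n then
    pvElimBelow modulo i n (j+1)
      (matrix.set j (pvAddRow modulo (matrix.getD j []) (matrix.getD i []) (-((matrix.getD j []).getD i 0))))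
  else matrix
termination_by n - j

-- forward elimination "for i in range(n): inv = get_inv(matrix[i][i]); matrix[i] = scale_row(...); <inner loop>"
def pvForward (modulo : Int) (n i : Nat) (matrix : List (List Int)) : Option (List (List Int)) :=
  if i < n then
    match pvInvMod ((matrix.getD i []).getD i 0) modulo with
    | none => none
    | some inv =>
        pvForward modulo n (i+1)
          (pvElimBelow modulo i n (i+1) (matrix.set i (pvScaleRow modulo (matrix.getD i []) inv)))
  else some matrix
termination_by n - i

-- inner loop "for j in range(i-1, -1, -1): matrix[j] = add_row(matrix[j], matrix[i], -matrix[j][i])" (j = l-1 … 0)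
def pvElimAbove (modulo : Int) (i : Nat) : Nat → List (List Int) → List (List Int)
  | 0, matrix => matrix
  | l+1, matrix =>
      pvElimAbove modulo i l
        (matrix.set l (pvAddRow modulo (matrix.getD l []) (matrix.getD i []) (-((matrix.getD l []).getD i 0))))

-- outer loop "for i in range(n-1, -1, -1): <inner loop>" (i = k-1 … 0)
def pvBackward (modulo : Int) : Nat → List (List Int) → List (List Int)
  | 0, matrix => matrix
  | k+1, matrix => pvBackward modulo k (pvElimAbove modulo k k matrix)

def solve_modular_system (equations : List (Int × List Int)) (modulo : Int) : List Int :=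
  let n := equations.length
  let matrix := equations.map (fun eq => eq.2 ++ [eq.1])
  match pvForward modulo n 0 matrix with
  | none => []   -- Python raises ValueError here; such inputs are outside Pre_
  | some m2 => (pvBackward modulo n m2).map (fun row => row.getLast?.getD 0)  -- row[-1]

-- ===== PORT B =====
-- body of "for row in reversed(matrix): s = row[-1]; for c, x in zip(row[n-len(xs):n], xs): s -= c*x; xs = [s % modulo] + xs"
def pvBackSubStep (modulo : Int) (n : Nat) (row : List Int) (xs : List Int) : List Int :=
  let s0 := row.getLast?.getD 0  -- row[-1]
  let cs := PySem.List.slice row (some ((n : Int) - (xs.length : Int))) (some (n : Int))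
  PySem.Int.mod ((cs.zip xs).foldl (fun s cx => s - cx.1 * cx.2) s0) modulo :: xs

def solve_modular_system_alt (equations : List (Int × List Int)) (modulo : Int) : List Int :=
  let n := equations.length
  let matrix := equations.map (fun eq => eq.2 ++ [eq.1])
  -- forward elimination: Source B's forward pass is textually A's, so it shares A's helpers
  match pvForward modulo n 0 matrix with
  | none => []
  | some m2 => m2.foldr (pvBackSubStep modulo n) []

-- ===== PRECONDITION & SPEC =====
-- determinant by the Leibniz formula (a closed form; used only to STATE Pre_)
def pvInversions : List Nat → Nat
  | [] => 0
  | x :: xs => xs.countP (fun y => y < x) + pvInversions xs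

def pvDet (rows : List (List Int)) : Int :=
  ((PySem.List.permutations (List.range rows.length) rows.length).map
    (fun p => (-1)^(pvInversions p) * ((rows.zip p).map (fun rc => rc.1.getD rc.2 0)).prod)).sum

def pvWidth (equations : List (Int × List Int)) : Nat := ((equations.getD 0 (0, [])).2).length

-- The inputs on which A returns: the first equation has the fewest coefficients (so zip
-- truncation makes every augmented row the same width after the first elimination step), that
-- width is at least the number of equations, the modulus is nonzero (unless the system is
-- empty), and every leading principal minor of the augmented matrix is coprime to the modulus
-- (⟺ every pivot hit by the no-pivoting elimination is invertible, so no ValueError /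
-- IndexError). Pre_ excludes ragged systems (a later row shorter than the first, or fewer
-- coefficients than equations - 1) on which A still returns a value that is an artifact of
-- zip-truncation of rows; see the claim cites.
-- (For |modulo| = 1 every value reduces to 0, so A returns a zero vector as soon as no index
-- is out of range; that is the first disjunct.)
def Pre_solve_modular_system (equations : List (Int × List Int)) (modulo : Int) : Prop :=
  ((modulo = 1 ∨ modulo = -1) ∧
    (∀ i, i < equations.length → ∀ j, j ≤ i → i ≤ (equations.getD j (0, [])).2.length)) ∨
  ((∀ eq ∈ equations, pvWidth equations ≤ eq.2.length) ∧
  equations.length ≤ pvWidth equations + 1 ∧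
  (equations = [] ∨ modulo ≠ 0) ∧
  (∀ k, k < equations.length →
    Int.gcd (pvDet ((equations.take (k+1)).map (fun eq => (eq.2 ++ [eq.1]).take (k+1)))) modulo = 1))

instance (equations : List (Int × List Int)) (modulo : Int) : Decidable (Pre_solve_modular_system equations modulo) := by
  unfold Pre_solve_modular_system; infer_instance

def pvWitness_solve_modular_system : (List (Int × List Int)) × Int := ([(5, [1, 0]), (7, [0, 1])], 11)

def Spec_solve_modular_system (equations : List (Int × List Int)) (modulo : Int) (out : List Int) : Prop := out = solve_modular_system_alt equations modulo
instance (equations : List (Int × List Int)) (modulo : Int) (out : List Int) : Decidable (Spec_solve_modular_system equations modulo out) := by unfold Spec_solve_modular_system; infer_instance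

-- ===== CLAIM (what is proved, stated in full; the proofs are below) =====
def Claim_equal_solve_modular_system : Prop := ∀ (equations : List (Int × List Int)) (modulo : Int), Dom_solve_modular_system equations modulo → Pre_solve_modular_system equations modulo → Spec_solve_modular_system equations modulo (solve_modular_system equations modulo)

-- ===== LEMMAS AND PROOFS =====

-- small getD/set utilities
theorem pvGetD_set {α : Type} (l : List α) (i j : Nat) (a d : α) :
    (l.set i a).getD j d = if i = j ∧ j < l.length then a else l.getD j d := by
  simp only [List.getD_eq_getElem?_getD, List.getElem?_set]
  split_ifs with h1 h2 h3 <;> simp_all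

-- Python-mod (Int.fmod) congruences
theorem pvFmod_fmod (a m : Int) : PySem.Int.mod (PySem.Int.mod a m) m = PySem.Int.mod a m := by
  simp [PySem.Int.mod]

theorem pvFmod_add_mul_fmod (a b c m : Int) :
    PySem.Int.mod (a + b * PySem.Int.mod c m) m = PySem.Int.mod (a + b * c) m := by
  simp only [PySem.Int.mod]
  rw [Int.add_fmod, Int.mul_fmod, Int.fmod_fmod, ← Int.mul_fmod, ← Int.add_fmod]

theorem pvFmod_fmod_sub (a t m : Int) :
    PySem.Int.mod (PySem.Int.mod a m - t) m = PySem.Int.mod (a - t) m := by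
  simp only [PySem.Int.mod]
  rw [Int.sub_fmod, Int.fmod_fmod, ← Int.sub_fmod]

-- the scaled pivot entry: d * (Bézout inverse of d) ≡ 1
theorem pvInv_diag (d m inv : Int) (h : pvInvMod d m = some inv) :
    PySem.Int.mod (d * inv) m = PySem.Int.mod 1 m := by
  simp only [pvInvMod] at h
  by_cases hm : m = 0
  · simp [hm] at h
  by_cases hg : Int.gcd d m = 1
  · simp only [hm, hg, if_false, if_true, Option.some.injEq] at h
    rw [← h]
    have hb := Int.gcd_eq_gcd_ab d m
    rw [hg] at hb
    have hda : d * Int.gcdA d m = 1 - m * Int.gcdB d m := by push_cast at hb; linarith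
    simp only [PySem.Int.mod]
    rw [Int.mul_fmod, Int.fmod_fmod, ← Int.mul_fmod, hda, Int.sub_mul_fmod_self_left]
  · simp [hm, hg] at h

theorem pvInvMod_mzero (d m inv : Int) (h : pvInvMod d m = some inv) : m ≠ 0 := by
  unfold pvInvMod at h
  by_contra hm; simp [hm] at h

-- row helpers: lengths and entries
theorem pvAddRow_length (m : Int) (r1 r2 : List Int) (f : Int) :
    (pvAddRow m r1 r2 f).length = min r1.length r2.length := by
  simp [pvAddRow]

theorem pvAddRow_getD (m : Int) (r1 r2 : List Int) (f : Int) (c : Nat)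
    (h1 : c < r1.length) (h2 : c < r2.length) :
    (pvAddRow m r1 r2 f).getD c 0 = PySem.Int.mod (r1.getD c 0 + f * r2.getD c 0) m := by
  have hlen : c < (pvAddRow m r1 r2 f).length := by rw [pvAddRow_length]; omega
  rw [List.getD_eq_getElem _ _ hlen, List.getD_eq_getElem _ _ h1, List.getD_eq_getElem _ _ h2]
  simp [pvAddRow]

theorem pvScaleRow_length (m : Int) (r : List Int) (f : Int) :
    (pvScaleRow m r f).length = r.length := by simp [pvScaleRow]

theorem pvScaleRow_getD (m : Int) (r : List Int) (f : Int) (c : Nat) (h : c < r.length) :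
    (pvScaleRow m r f).getD c 0 = PySem.Int.mod (r.getD c 0 * f) m := by
  have hlen : c < (pvScaleRow m r f).length := by rw [pvScaleRow_length]; omega
  rw [List.getD_eq_getElem _ _ hlen, List.getD_eq_getElem _ _ h]
  simp [pvScaleRow]

-- canonical rows: every entry is its own Python-mod
def pvCanon (m : Int) (row : List Int) : Prop := ∀ x ∈ row, PySem.Int.mod x m = x

theorem pvCanon_scaleRow (m : Int) (r : List Int) (f : Int) : pvCanon m (pvScaleRow m r f) := by
  intro x hx
  simp [pvScaleRow] at hx
  obtain ⟨a, _, rfl⟩ := hx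
  exact pvFmod_fmod _ m

theorem pvCanon_getD (m : Int) (row : List Int) (h : pvCanon m row) (c : Nat) :
    PySem.Int.mod (row.getD c 0) m = row.getD c 0 := by
  by_cases hc : c < row.length
  · rw [List.getD_eq_getElem row 0 hc]; exact h _ (List.getElem_mem hc)
  · rw [List.getD_eq_default _ _ (le_of_not_gt hc)]
    simp [PySem.Int.mod]

-- shape of the matrix after forward elimination: w is the common number of coefficient
-- columns (rows have length w+1), n the number of equations, n ≤ w
def pvGoodRow (m : Int) (w r : Nat) (row : List Int) : Prop :=
  row.length = w + 1 ∧ (∀ c, c < r → row.getD c 0 = 0) ∧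
  row.getD r 0 = PySem.Int.mod 1 m ∧ pvCanon m row

def pvShape (m : Int) (n w : Nat) (M : List (List Int)) : Prop :=
  M.length = n ∧ ∀ r, r < n → pvGoodRow m w r (M.getD r [])

-- closed form of the inner forward loop
theorem pvElimBelow_length (m : Int) (i n : Nat) : ∀ j mat, (pvElimBelow m i n j mat).length = mat.length := by
  intro j mat
  fun_induction pvElimBelow m i n j mat <;> simp_all

theorem pvElimBelow_getD (m : Int) (i n : Nat) : ∀ j mat, i < j → ∀ r,
    (pvElimBelow m i n j mat).getD r [] =
      if j ≤ r ∧ r < n ∧ r < mat.length then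
        pvAddRow m (mat.getD r []) (mat.getD i []) (-((mat.getD r []).getD i 0))
      else mat.getD r [] := by
  intro j mat
  fun_induction pvElimBelow m i n j mat with
  | case1 j mat hj ih =>
      intro hij r
      rw [ih (by omega) r]
      simp only [List.length_set]
      have hgi : (mat.set j (pvAddRow m (mat.getD j []) (mat.getD i []) (-((mat.getD j []).getD i 0)))).getD i [] = mat.getD i [] := by
        rw [pvGetD_set, if_neg (by omega)]
      by_cases hr1 : j + 1 ≤ r ∧ r < n ∧ r < mat.length
      · have hgr : (mat.set j (pvAddRow m (mat.getD j []) (mat.getD i []) (-((mat.getD j []).getD i 0)))).getD r [] = mat.getD r [] := by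
          rw [pvGetD_set, if_neg (by omega)]
        rw [if_pos hr1, hgr, hgi, if_pos (by omega)]
      · rw [if_neg hr1]
        by_cases hr2 : r = j
        · subst hr2
          by_cases hl : r < mat.length
          · rw [pvGetD_set, if_pos ⟨rfl, hl⟩, if_pos (by omega)]
          · rw [pvGetD_set, if_neg (by omega), if_neg (by omega)]
        · rw [pvGetD_set, if_neg (by omega), if_neg (by omega)]
  | case2 j mat hj =>
      intro hij r
      rw [if_neg (by omega)]

-- forward elimination success yields the unit upper-triangular shape
theorem pvForward_shape_aux (m : Int) (n w : Nat) (hnw : n ≤ w + 1) : ∀ (t i : Nat) (matrix M : List (List Int)),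
    n - i ≤ t →
    matrix.length = n →
    (∀ r, r < i → pvGoodRow m w r (matrix.getD r [])) →
    (i < n → (matrix.getD i []).length = w + 1) →
    (∀ r, i ≤ r → r < n → w + 1 ≤ (matrix.getD r []).length ∧ ∀ c, c < i → (matrix.getD r []).getD c 0 = 0) →
    pvForward m n i matrix = some M → pvShape m n w M := by
  intro t
  induction t with
  | zero =>
      intro i matrix M ht hlen hgood hpiv hrest heq
      rw [pvForward.eq_def, if_neg (by omega)] at heq
      have hM : M = matrix := by simpa using heq.symm
      subst hM
      exact ⟨hlen, fun r hr => hgood r (by omega)⟩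
  | succ t ih =>
      intro i matrix M ht hlen hgood hpiv hrest heq
      rw [pvForward.eq_def] at heq
      by_cases hi : i < n
      · rw [if_pos hi] at heq
        cases hinv : pvInvMod ((matrix.getD i []).getD i 0) m with
        | none => rw [hinv] at heq; simp at heq
        | some inv =>
            rw [hinv] at heq
            simp only [] at heq
            have hm : m ≠ 0 := pvInvMod_mzero _ _ _ hinv
            have hrowi := hrest i (le_refl i) hi
            have hpivi := hpiv hi
            -- the scaled pivot row is good
            have hpivlen : (pvScaleRow m (matrix.getD i []) inv).length = w + 1 := by
              rw [pvScaleRow_length]; exact hpivi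
            have hpivzero : ∀ c, c < i → (pvScaleRow m (matrix.getD i []) inv).getD c 0 = 0 := by
              intro c hc
              rw [pvScaleRow_getD m _ inv c (by omega), hrowi.2 c hc]
              simp [PySem.Int.mod]
            have hpivdiag : (pvScaleRow m (matrix.getD i []) inv).getD i 0 = PySem.Int.mod 1 m := by
              rw [pvScaleRow_getD m _ inv i (by omega)]
              exact pvInv_diag _ _ _ hinv
            have hpivgood : pvGoodRow m w i (pvScaleRow m (matrix.getD i []) inv) :=
              ⟨hpivlen, hpivzero, hpivdiag, pvCanon_scaleRow m _ inv⟩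
            have hm1len : (matrix.set i (pvScaleRow m (matrix.getD i []) inv)).length = n := by
              simp [hlen]
            have hm1i : (matrix.set i (pvScaleRow m (matrix.getD i []) inv)).getD i [] = pvScaleRow m (matrix.getD i []) inv := by
              rw [pvGetD_set, if_pos ⟨rfl, by omega⟩]
            have hm1ne : ∀ r, r ≠ i → (matrix.set i (pvScaleRow m (matrix.getD i []) inv)).getD r [] = matrix.getD r [] := by
              intro r hr
              rw [pvGetD_set, if_neg (by omega)]
            refine ih (i+1) _ M (by omega) ?_ ?_ ?_ ?_ heq
            · rw [pvElimBelow_length, hm1len]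
            · -- rows < i+1 are good after the inner loop
              intro r hr
              rw [pvElimBelow_getD m i n (i+1) _ (by omega) r, if_neg (by omega)]
              by_cases hri : r = i
              · subst hri; rw [hm1i]; exact hpivgood
              · rw [hm1ne r hri]; exact hgood r (by omega)
            · -- the next pivot row now has exact width w+1
              intro hi1
              rw [pvElimBelow_getD m i n (i+1) _ (by omega) (i+1),
                if_pos ⟨le_refl _, hi1, by omega⟩, hm1ne (i+1) (by omega), hm1i,
                pvAddRow_length, hpivlen]
              have := (hrest (i+1) (by omega) hi1).1
              omega
            · -- rows ≥ i+1: correct length (now exact) and zeros in columns < i+1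
              intro r hr1 hr2
              rw [pvElimBelow_getD m i n (i+1) _ (by omega) r, if_pos ⟨hr1, hr2, by omega⟩,
                hm1ne r (by omega), hm1i]
              have hrlen := (hrest r (by omega) hr2).1
              constructor
              · rw [pvAddRow_length, hpivlen]; omega
              · intro c hc
                rw [pvAddRow_getD m _ _ _ c (by omega) (by omega)]
                by_cases hci : c = i
                · subst hci
                  rw [hpivdiag, pvFmod_add_mul_fmod]
                  simp [PySem.Int.mod]
                · rw [hpivzero c (by omega), (hrest r (by omega) hr2).2 c (by omega)]
                  simp [PySem.Int.mod]
      · rw [if_neg hi] at heq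
        have hM : M = matrix := by simpa using heq.symm
        subst hM
        exact ⟨hlen, fun r hr => hgood r (by omega)⟩

theorem pvForward_shape (m : Int) (n w : Nat) (hnw : n ≤ w + 1) (matrix M : List (List Int))
    (hlen : matrix.length = n)
    (hrow0 : 0 < n → (matrix.getD 0 []).length = w + 1)
    (hrows : ∀ r, r < n → w + 1 ≤ (matrix.getD r []).length)
    (heq : pvForward m n 0 matrix = some M) : pvShape m n w M :=
  pvForward_shape_aux m n w hnw n 0 matrix M (by omega) hlen (by omega) hrow0
    (fun r _ hr => ⟨hrows r hr, by omega⟩) heq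

-- ---- backward pass: A's second elimination vs B's back-substitution ----

def pvX (m : Int) (n : Nat) (M : List (List Int)) : List Int := M.foldr (pvBackSubStep m n) []

-- the value accumulated in column q of row r while pivots n-1 … k are applied
def pvYq (m : Int) (n : Nat) (M : List (List Int)) (r q k : Nat) : Int :=
  if k < n then
    PySem.Int.mod (pvYq m n M r q (k+1) - (M.getD r []).getD k 0 * pvYq m n M k q (k+1)) m
  else (M.getD r []).getD q 0
termination_by n - k

-- row r after A's backward pass has applied all pivots (closed form)
def pvFinalRow (m : Int) (n w : Nat) (M : List (List Int)) (r : Nat) : List Int :=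
  (List.range (w+1)).map (fun c =>
    if c < n then (if c = r then PySem.Int.mod 1 m else 0) else pvYq m n M r c (r+1))

-- row r after A's backward pass has applied pivots n-1 … k
def pvRed (m : Int) (n w : Nat) (M : List (List Int)) (r k : Nat) : List Int :=
  if k < n then
    pvAddRow m (pvRed m n w M r (k+1)) (pvFinalRow m n w M k) (-((pvRed m n w M r (k+1)).getD k 0))
  else M.getD r []
termination_by n - k

def pvSum (m : Int) (n : Nat) (M : List (List Int)) (r k : Nat) : Int :=
  ((List.range (n - k)).map
    (fun t => (M.getD r []).getD (k+t) 0 * (pvX m n M).getD (k+t) 0)).sum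

theorem pvFinalRow_length (m : Int) (n w : Nat) (M : List (List Int)) (r : Nat) :
    (pvFinalRow m n w M r).length = w + 1 := by
  simp [pvFinalRow]

theorem pvFinalRow_getD (m : Int) (n w : Nat) (M : List (List Int)) (r c : Nat) :
    (pvFinalRow m n w M r).getD c 0 =
      if c ≤ w then
        (if c < n then (if c = r then PySem.Int.mod 1 m else 0) else pvYq m n M r c (r+1))
      else 0 := by
  by_cases hc : c ≤ w
  · rw [if_pos hc]
    have hcl : c < ((List.range (w+1)).map (fun c =>
        if c < n then (if c = r then PySem.Int.mod 1 m else 0) else pvYq m n M r c (r+1))).length := by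
      rw [List.length_map, List.length_range]; omega
    rw [pvFinalRow, List.getD_eq_getElem _ _ hcl]
    simp only [List.getElem_map, List.getElem_range]
  · rw [if_neg hc]
    exact List.getD_eq_default _ _ (by rw [pvFinalRow_length]; omega)

theorem pvX_length (m : Int) (n : Nat) : ∀ (mat : List (List Int)) (acc : List Int),
    (mat.foldr (pvBackSubStep m n) acc).length = mat.length + acc.length := by
  intro mat
  induction mat with
  | nil => intro acc; simp
  | cons hd tl ih => intro acc; simp [pvBackSubStep, ih]; omega

theorem pvDrop_foldr_backsub (m : Int) (n : Nat) : ∀ (mat : List (List Int)) (acc : List Int) (r : Nat),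
    mat.length = r → (mat.foldr (pvBackSubStep m n) acc).drop r = acc := by
  intro mat
  induction mat with
  | nil => intro acc r hr; simp at hr; simp [← hr]
  | cons hd tl ih =>
      intro acc r hr
      simp at hr
      subst hr
      simp only [List.foldr_cons, pvBackSubStep, List.drop_succ_cons]
      exact ih acc tl.length rfl

theorem pvX_drop (m : Int) (n : Nat) (M : List (List Int)) (r : Nat) (hr : r ≤ M.length) :
    (pvX m n M).drop r = (M.drop r).foldr (pvBackSubStep m n) [] := by
  unfold pvX
  conv_lhs => rw [← List.take_append_drop r M, List.foldr_append]
  exact pvDrop_foldr_backsub m n _ _ r (by simp [hr])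

-- foldl of repeated subtraction is subtraction of the sum
theorem pvFoldl_sub_sum : ∀ (L : List (Int × Int)) (s0 : Int),
    L.foldl (fun s cx => s - cx.1 * cx.2) s0 = s0 - (L.map (fun cx => cx.1 * cx.2)).sum := by
  intro L
  induction L with
  | nil => intro s0; simp
  | cons hd tl ih => intro s0; simp [ih]; ring

theorem pvSum_succ (m : Int) (n : Nat) (M : List (List Int)) (r k : Nat) (hk : k < n) :
    pvSum m n M r k
      = (M.getD r []).getD k 0 * (pvX m n M).getD k 0 + pvSum m n M r (k+1) := by
  unfold pvSum
  rw [show n - k = (n - (k+1)) + 1 by omega, List.range_succ_eq_map]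
  simp only [List.map_cons, List.sum_cons, List.map_map, Nat.add_zero]
  congr 1
  apply congrArg List.sum
  apply List.map_congr_left
  intro t ht
  simp only [Function.comp]
  rw [show k + (t + 1) = (k + 1) + t by omega]

theorem pvList_ext (l1 l2 : List Int) (hlen : l1.length = l2.length)
    (h : ∀ c, l1.getD c 0 = l2.getD c 0) : l1 = l2 := by
  apply List.ext_getElem hlen
  intro c h1 h2
  have := h c
  rwa [List.getD_eq_getElem _ _ h1, List.getD_eq_getElem _ _ h2] at this

theorem pvX_len (m : Int) (n : Nat) (M : List (List Int)) (h : M.length = n) :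
    (pvX m n M).length = n := by
  unfold pvX; rw [pvX_length]; simp [h]

-- the back-substitution value of row r
theorem pvX_getD (m : Int) (n w : Nat) (hnw : n ≤ w + 1) (M : List (List Int)) (hM : M.length = n)
    (hrow : ∀ r, r < n → (M.getD r []).length = w + 1) (r : Nat) (hr : r < n) :
    (pvX m n M).getD r 0 = PySem.Int.mod ((M.getD r []).getD w 0 - pvSum m n M r (r+1)) m := by
  have hXlen : (pvX m n M).length = n := pvX_len m n M hM
  have hdropX : (pvX m n M).drop r
      = pvBackSubStep m n (M.getD r []) ((pvX m n M).drop (r+1)) := by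
    rw [pvX_drop m n M r (by omega), pvX_drop m n M (r+1) (by omega),
      List.drop_eq_getElem_cons (by omega : r < M.length), List.foldr_cons]
    congr 1
    exact (List.getD_eq_getElem M [] (by omega)).symm
  have h0 : (pvX m n M).getD r 0 = ((pvX m n M).drop r).getD 0 0 := by
    simp [List.getD_eq_getElem?_getD, List.getElem?_drop]
  have hxslen : ((pvX m n M).drop (r+1)).length = n - (r+1) := by
    rw [List.length_drop, hXlen]
  rw [h0, hdropX]
  unfold pvBackSubStep
  simp only [List.getD_cons_zero]
  have hrlen : (M.getD r []).length = w + 1 := hrow r hr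
  -- row[-1] is the entry in column w
  have hlast : (M.getD r []).getLast?.getD 0 = (M.getD r []).getD w 0 := by
    rw [List.getLast?_eq_getElem?, hrlen, List.getD_eq_getElem?_getD]
    simp
  -- identify the slice
  have hcast : (n : Int) - ((((pvX m n M).drop (r+1)).length : Nat) : Int) = (((r+1 : Nat)) : Int) := by
    rw [hxslen]; push_cast; omega
  rw [hcast, PySem.List.slice_natCast, pvFoldl_sub_sum, hlast]
  congr 1
  -- the subtracted sum is pvSum r (r+1)
  have hzip : ((((M.getD r []).drop (r+1)).take (n - (r+1))).zip ((pvX m n M).drop (r+1))).map (fun cx => cx.1 * cx.2)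
      = (List.range (n - (r+1))).map (fun t => (M.getD r []).getD ((r+1)+t) 0 * (pvX m n M).getD ((r+1)+t) 0) := by
    have hcslen : (((M.getD r []).drop (r+1)).take (n - (r+1))).length = n - (r+1) := by
      rw [List.length_take, List.length_drop, hrlen]; omega
    apply pvList_ext
    · rw [List.length_map, List.length_zip, hcslen, hxslen, List.length_map, List.length_range]
      omega
    · intro c
      by_cases hc : c < n - (r+1)
      · have hc1 : c < (((((M.getD r []).drop (r+1)).take (n - (r+1))).zip ((pvX m n M).drop (r+1))).map (fun cx => cx.1 * cx.2)).length := by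
          rw [List.length_map, List.length_zip, hcslen, hxslen]; omega
        have hc2 : c < ((List.range (n - (r+1))).map (fun t => (M.getD r []).getD ((r+1)+t) 0 * (pvX m n M).getD ((r+1)+t) 0)).length := by
          rw [List.length_map, List.length_range]; omega
        rw [List.getD_eq_getElem _ _ hc1, List.getD_eq_getElem _ _ hc2]
        simp only [List.getElem_map, List.getElem_zip, List.getElem_take, List.getElem_drop,
          List.getElem_range]
        rw [List.getD_eq_getElem _ _ (show (r+1)+c < (M.getD r []).length by rw [hrlen]; omega),
          List.getD_eq_getElem _ _ (show (r+1)+c < (pvX m n M).length by rw [hXlen]; omega)]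
      · rw [List.getD_eq_default _ _ (by rw [List.length_map, List.length_zip, hcslen, hxslen]; omega),
          List.getD_eq_default _ _ (by rw [List.length_map, List.length_range]; omega)]
  rw [hzip]
  rfl

-- pvYq in the last column, with the later solution values known, collapses to one mod
theorem pvYq_sum (m : Int) (n w : Nat) (M : List (List Int)) (hsh : pvShape m n w M)
    (r : Nat) (hr : r < n)
    (hX : ∀ k, r < k → k < n → pvYq m n M k w (k+1) = (pvX m n M).getD k 0) :
    ∀ t k, n - k = t → r < k → k ≤ n →
    pvYq m n M r w k = PySem.Int.mod ((M.getD r []).getD w 0 - pvSum m n M r k) m := by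
  intro t
  induction t with
  | zero =>
      intro k ht hk1 hk2
      rw [pvYq.eq_def, if_neg (by omega)]
      unfold pvSum
      rw [show n - k = 0 from ht]
      simp only [List.range_zero, List.map_nil, List.sum_nil, sub_zero]
      exact (pvCanon_getD m _ (hsh.2 r hr).2.2.2 w).symm
  | succ t ih =>
      intro k ht hk1 hk2
      have hkn : k < n := by omega
      rw [pvYq.eq_def]
      rw [if_pos hkn, hX k (by omega) hkn, ih (k+1) (by omega) (by omega) (by omega), pvFmod_fmod_sub,
        pvSum_succ m n M r k hkn]
      congr 1
      ring

-- the last column of the fully reduced row IS the back-substitution value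
theorem pvYq_X (m : Int) (n w : Nat) (hnw : n ≤ w + 1) (M : List (List Int)) (hsh : pvShape m n w M) :
    ∀ t r, n - r = t → r < n → pvYq m n M r w (r+1) = (pvX m n M).getD r 0 := by
  intro t
  induction t using Nat.strong_induction_on with
  | _ t ih =>
      intro r ht hr
      have hX : ∀ k, r < k → k < n → pvYq m n M k w (k+1) = (pvX m n M).getD k 0 := by
        intro k hk1 hk2
        exact ih (n - k) (by omega) k rfl hk2
      rw [pvYq_sum m n w M hsh r hr hX (n - (r+1)) (r+1) rfl (by omega) (by omega)]
      exact (pvX_getD m n w hnw M hsh.1 (fun r' h' => (hsh.2 r' h').1) r hr).symm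

-- when the width is exactly n-1 (the constant column doubles as the last pivot column),
-- back-substitution returns the last column of the identity
theorem pvX_pivot_col (m : Int) (n w : Nat) (hwn : n = w + 1) (M : List (List Int)) (hsh : pvShape m n w M) :
    ∀ t r, n - r = t → r < n → (pvX m n M).getD r 0 = (if r = w then PySem.Int.mod 1 m else 0) := by
  intro t
  induction t using Nat.strong_induction_on with
  | _ t ih =>
      intro r ht hr
      have hXc : ∀ k, r < k → k < n → (pvX m n M).getD k 0 = (if k = w then PySem.Int.mod 1 m else 0) :=
        fun k hk1 hk2 => ih (n - k) (by omega) k rfl hk2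
      have hsum : ∀ s k, n - k = s → r < k → k ≤ n →
          pvSum m n M r k = (if k ≤ w then (M.getD r []).getD w 0 * PySem.Int.mod 1 m else 0) := by
        intro s
        induction s with
        | zero =>
            intro k hks hk1 hk2
            unfold pvSum
            rw [show n - k = 0 by omega]
            simp only [List.range_zero, List.map_nil, List.sum_nil]
            rw [if_neg (by omega)]
        | succ s ihs =>
            intro k hks hk1 hk2
            have hkn : k < n := by omega
            rw [pvSum_succ m n M r k hkn, ihs (k+1) (by omega) (by omega) (by omega), hXc k hk1 hkn]
            by_cases hkw : k = w
            · rw [if_pos hkw, if_neg (by omega), if_pos (by omega), hkw]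
              ring
            · rw [if_neg hkw, if_pos (by omega), if_pos (by omega)]
              ring
      rw [pvX_getD m n w (by omega) M hsh.1 (fun r' h' => (hsh.2 r' h').1) r hr]
      by_cases hrw : r = w
      · rw [if_pos hrw, hsum (n-(r+1)) (r+1) rfl (by omega) (by omega), if_neg (by omega), sub_zero]
        have hdiag := (hsh.2 r hr).2.2.1
        rw [← hrw, hdiag, pvFmod_fmod]
      · rw [if_neg hrw, hsum (n-(r+1)) (r+1) rfl (by omega) (by omega), if_pos (by omega)]
        have harr : (M.getD r []).getD w 0 - (M.getD r []).getD w 0 * PySem.Int.mod 1 m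
            = (M.getD r []).getD w 0 + (-(M.getD r []).getD w 0) * PySem.Int.mod 1 m := by ring
        rw [harr, pvFmod_add_mul_fmod]
        simp [PySem.Int.mod]

theorem pvRed_spec (m : Int) (n w : Nat) (hnw : n ≤ w + 1) (M : List (List Int)) (hsh : pvShape m n w M)
    (r : Nat) (hr : r < n) : ∀ t k, n - k = t → r < k → k ≤ n →
    (pvRed m n w M r k).length = w + 1 ∧
    ∀ c, (pvRed m n w M r k).getD c 0 =
      if c < n then (if k ≤ c then 0 else (M.getD r []).getD c 0)
      else if c ≤ w then pvYq m n M r c k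
      else 0 := by
  have hrow := hsh.2 r hr
  intro t
  induction t with
  | zero =>
      intro k ht hk1 hk2
      rw [pvRed.eq_def, if_neg (by omega)]
      refine ⟨hrow.1, ?_⟩
      intro c
      by_cases hc : c < n
      · rw [if_pos hc, if_neg (by omega)]
      · rw [if_neg hc]
        by_cases hcw : c ≤ w
        · rw [if_pos hcw, pvYq.eq_def, if_neg (by omega)]
        · rw [if_neg hcw]
          exact List.getD_eq_default _ _ (by rw [hrow.1]; omega)
  | succ t ih =>
      intro k ht hk1 hk2
      have hkn : k < n := by omega
      obtain ⟨ihlen, ihget⟩ := ih (k+1) (by omega) (by omega) (by omega)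
      have hFlen := pvFinalRow_length m n w M k
      have hRk : (pvRed m n w M r (k+1)).getD k 0 = (M.getD r []).getD k 0 := by
        rw [ihget k, if_pos hkn, if_neg (by omega)]
      rw [pvRed.eq_def, if_pos hkn]
      constructor
      · rw [pvAddRow_length, ihlen, hFlen]; omega
      · intro c
        by_cases hcw : c ≤ w
        · rw [pvAddRow_getD m _ _ _ c (by omega) (by omega), pvFinalRow_getD m n w M k c,
            if_pos hcw]
          by_cases hcn : c < n
          · rw [if_pos hcn, if_pos hcn]
            by_cases hck : c = k
            · subst hck
              rw [if_pos rfl, hRk, pvFmod_add_mul_fmod, if_pos (le_refl c)]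
              simp [PySem.Int.mod]
            · rw [if_neg hck]
              simp only [mul_zero, add_zero]
              rw [ihget c, if_pos hcn]
              by_cases hkc : k + 1 ≤ c
              · rw [if_pos hkc, if_pos (by omega)]
                simp [PySem.Int.mod]
              · rw [if_neg hkc, if_neg (by omega)]
                exact pvCanon_getD m _ hrow.2.2.2 c
          · -- passenger column: n ≤ c ≤ w
            rw [if_neg hcn, if_neg hcn, if_pos hcw,
              ihget c, if_neg hcn, if_pos hcw, hRk]
            conv_rhs => rw [pvYq.eq_def]
            rw [if_pos hkn]
            congr 1
            ring
        · rw [List.getD_eq_default _ _ (by rw [pvAddRow_length, ihlen, hFlen]; omega),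
            if_neg (by omega), if_neg hcw]

theorem pvRed_final (m : Int) (n w : Nat) (hnw : n ≤ w + 1) (M : List (List Int)) (hsh : pvShape m n w M)
    (r : Nat) (hr : r < n) : pvRed m n w M r (r+1) = pvFinalRow m n w M r := by
  obtain ⟨hlen, hget⟩ := pvRed_spec m n w hnw M hsh r hr (n - (r+1)) (r+1) rfl (by omega) (by omega)
  have hrow := hsh.2 r hr
  apply pvList_ext
  · rw [hlen, pvFinalRow_length]
  · intro c
    rw [hget c, pvFinalRow_getD m n w M r c]
    by_cases hcn : c < n
    · rw [if_pos hcn, if_pos hcn, if_pos (by omega : c ≤ w)]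
      by_cases h1 : c = r
      · rw [if_pos h1, if_neg (by omega), h1]
        exact hrow.2.2.1
      · rw [if_neg h1]
        by_cases h2 : r + 1 ≤ c
        · rw [if_pos h2]
        · rw [if_neg h2]
          exact hrow.2.1 c (by omega)
    · rw [if_neg hcn, if_neg hcn]

theorem pvElimAbove_length (m : Int) (i : Nat) : ∀ l mat, (pvElimAbove m i l mat).length = mat.length := by
  intro l
  induction l with
  | zero => intro mat; rfl
  | succ l ih => intro mat; rw [pvElimAbove, ih]; simp

theorem pvElimAbove_getD (m : Int) (i : Nat) : ∀ l mat, l ≤ i → ∀ r,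
    (pvElimAbove m i l mat).getD r [] =
      if r < l ∧ r < mat.length then
        pvAddRow m (mat.getD r []) (mat.getD i []) (-((mat.getD r []).getD i 0))
      else mat.getD r [] := by
  intro l
  induction l with
  | zero => intro mat hl r; rw [pvElimAbove, if_neg (by omega)]
  | succ l ih =>
      intro mat hl r
      rw [pvElimAbove, ih _ (by omega) r]
      simp only [List.length_set]
      have hgi : (mat.set l (pvAddRow m (mat.getD l []) (mat.getD i []) (-((mat.getD l []).getD i 0)))).getD i [] = mat.getD i [] := by
        rw [pvGetD_set, if_neg (by omega)]
      by_cases hr1 : r < l ∧ r < mat.length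
      · have hgr : (mat.set l (pvAddRow m (mat.getD l []) (mat.getD i []) (-((mat.getD l []).getD i 0)))).getD r [] = mat.getD r [] := by
          rw [pvGetD_set, if_neg (by omega)]
        rw [if_pos hr1, hgr, hgi, if_pos (by omega)]
      · rw [if_neg hr1]
        by_cases hr2 : r = l
        · subst hr2
          by_cases hlen : r < mat.length
          · rw [pvGetD_set, if_pos ⟨rfl, hlen⟩, if_pos (by omega)]
          · rw [pvGetD_set, if_neg (by omega), if_neg (by omega)]
        · rw [pvGetD_set, if_neg (by omega), if_neg (by omega)]

theorem pvBackward_spec (m : Int) (n w : Nat) (hnw : n ≤ w + 1) (M : List (List Int)) (hsh : pvShape m n w M) :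
    ∀ k mat, k ≤ n → mat.length = n →
    (∀ r, r < k → mat.getD r [] = pvRed m n w M r k) →
    (∀ r, k ≤ r → r < n → mat.getD r [] = pvFinalRow m n w M r) →
    (pvBackward m k mat).length = n ∧
    ∀ r, r < n → (pvBackward m k mat).getD r [] = pvFinalRow m n w M r := by
  intro k
  induction k with
  | zero =>
      intro mat hk hlen hred hfin
      exact ⟨hlen, fun r hr => hfin r (by omega) hr⟩
  | succ k ih =>
      intro mat hk hlen hred hfin
      rw [pvBackward]
      have hmatk : mat.getD k [] = pvFinalRow m n w M k := by
        rw [hred k (by omega), pvRed_final m n w hnw M hsh k (by omega)]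
      refine ih (pvElimAbove m k k mat) (by omega) (by rw [pvElimAbove_length, hlen]) ?_ ?_
      · intro r hr
        rw [pvElimAbove_getD m k k mat (le_refl k) r, if_pos ⟨hr, by omega⟩,
          hred r (by omega), hmatk]
        conv_rhs => rw [pvRed.eq_def]
        rw [if_pos (by omega : k < n)]
      · intro r hr1 hr2
        rw [pvElimAbove_getD m k k mat (le_refl k) r, if_neg (by omega)]
        by_cases hrk : r = k
        · rw [hrk, hmatk]
        · exact hfin r (by omega) hr2

-- ---- the degenerate moduli 1 and -1: every stored value becomes 0 ----

theorem pvFmod_pm1 (m x : Int) (hm : m = 1 ∨ m = -1) : PySem.Int.mod x m = 0 := by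
  rcases hm with h | h <;> subst h
  · simp [PySem.Int.mod, Int.fmod_one]
  · have h1 : ((-x).fmod (-(-1)) : Int) = -(x.fmod (-1)) := Int.neg_fmod_neg x (-1)
    simp only [neg_neg, Int.fmod_one] at h1
    simp only [PySem.Int.mod]
    omega

def pvAllZero (row : List Int) : Prop := ∀ x ∈ row, x = 0

theorem pvAllZero_addRow (m : Int) (hm : m = 1 ∨ m = -1) (r1 r2 : List Int) (f : Int) :
    pvAllZero (pvAddRow m r1 r2 f) := by
  intro x hx
  simp [pvAddRow] at hx
  obtain ⟨a, b, _, rfl⟩ := hx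
  exact pvFmod_pm1 m _ hm

theorem pvAllZero_scaleRow (m : Int) (hm : m = 1 ∨ m = -1) (r : List Int) (f : Int) :
    pvAllZero (pvScaleRow m r f) := by
  intro x hx
  simp [pvScaleRow] at hx
  obtain ⟨a, _, rfl⟩ := hx
  exact pvFmod_pm1 m _ hm

theorem pvAllZero_getLast (row : List Int) (h : pvAllZero row) : row.getLast?.getD 0 = 0 := by
  cases hl : row.getLast? with
  | none => rfl
  | some x => exact h x (List.mem_of_getLast? hl)

theorem pvForward_allZero (m : Int) (hm : m = 1 ∨ m = -1) (n : Nat) : ∀ (t i : Nat) (matrix M : List (List Int)),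
    n - i ≤ t → matrix.length = n →
    (∀ r, r < i → pvAllZero (matrix.getD r [])) →
    pvForward m n i matrix = some M →
    M.length = n ∧ ∀ r, r < n → pvAllZero (M.getD r []) := by
  intro t
  induction t with
  | zero =>
      intro i matrix M ht hlen hzero heq
      rw [pvForward.eq_def, if_neg (by omega)] at heq
      have hM : M = matrix := by simpa using heq.symm
      subst hM
      exact ⟨hlen, fun r hr => hzero r (by omega)⟩
  | succ t ih =>
      intro i matrix M ht hlen hzero heq
      rw [pvForward.eq_def] at heq
      by_cases hi : i < n
      · rw [if_pos hi] at heq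
        cases hinv : pvInvMod ((matrix.getD i []).getD i 0) m with
        | none => rw [hinv] at heq; simp at heq
        | some inv =>
            rw [hinv] at heq
            simp only [] at heq
            refine ih (i+1) _ M (by omega) ?_ ?_ heq
            · rw [pvElimBelow_length]; simp [hlen]
            · intro r hr
              rw [pvElimBelow_getD m i n (i+1) _ (by omega) r]
              by_cases hc : i + 1 ≤ r ∧ r < n ∧ r < (matrix.set i (pvScaleRow m (matrix.getD i []) inv)).length
              · rw [if_pos hc]
                exact pvAllZero_addRow m hm _ _ _
              · rw [if_neg hc]
                by_cases hri : r = i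
                · subst hri
                  rw [pvGetD_set]
                  by_cases hrl : r < matrix.length
                  · rw [if_pos ⟨rfl, hrl⟩]
                    exact pvAllZero_scaleRow m hm _ _
                  · rw [if_neg (by omega)]
                    rw [List.getD_eq_default _ _ (by omega)]
                    intro x hx
                    simp at hx
                · rw [pvGetD_set, if_neg (by omega)]
                  exact hzero r (by omega)
      · rw [if_neg hi] at heq
        have hM : M = matrix := by simpa using heq.symm
        subst hM
        exact ⟨hlen, fun r hr => hzero r (by omega)⟩

theorem pvBackward_allZero (m : Int) (hm : m = 1 ∨ m = -1) : ∀ (k : Nat) (mat : List (List Int)),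
    (∀ r, pvAllZero (mat.getD r [])) →
    (pvBackward m k mat).length = mat.length ∧ ∀ r, pvAllZero ((pvBackward m k mat).getD r []) := by
  intro k
  induction k with
  | zero => intro mat h; exact ⟨rfl, h⟩
  | succ k ih =>
      intro mat h
      rw [pvBackward]
      obtain ⟨hl, hz⟩ := ih (pvElimAbove m k k mat) (by
        intro r
        rw [pvElimAbove_getD m k k mat (le_refl k) r]
        by_cases hc : r < k ∧ r < mat.length
        · rw [if_pos hc]; exact pvAllZero_addRow m hm _ _ _
        · rw [if_neg hc]; exact h r)
      rw [hl, pvElimAbove_length]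
      exact ⟨rfl, hz⟩

theorem pvBackSub_allZero (m : Int) (hm : m = 1 ∨ m = -1) (n : Nat) :
    ∀ mat : List (List Int), mat.foldr (pvBackSubStep m n) [] = List.replicate mat.length 0 := by
  intro mat
  induction mat with
  | nil => rfl
  | cons hd tl ih =>
      simp only [List.foldr_cons, ih, List.length_cons, List.replicate_succ, pvBackSubStep]
      congr 1
      exact pvFmod_pm1 m _ hm

theorem solve_modular_system_spec : Claim_equal_solve_modular_system := by
  intro equations modulo hdom hpre
  unfold Spec_solve_modular_system
  simp only [solve_modular_system, solve_modular_system_alt]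
  cases hfwd : pvForward modulo equations.length 0 (equations.map (fun eq => eq.2 ++ [eq.1])) with
  | none => rfl
  | some M =>
    rcases hpre with ⟨hm1, _⟩ | ⟨hsq, hnw, hmz, _⟩
    · -- degenerate modulus: both sides are the zero vector
      show (pvBackward modulo equations.length M).map (fun row => row.getLast?.getD 0)
          = M.foldr (pvBackSubStep modulo equations.length) []
      obtain ⟨hMlen, hMzero⟩ := pvForward_allZero modulo hm1 equations.length
        equations.length 0 _ M (by omega) (by simp) (by omega) hfwd
      obtain ⟨hblen, hbzero⟩ := pvBackward_allZero modulo hm1 equations.length M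
        (fun r => by
          by_cases hr : r < equations.length
          · exact hMzero r hr
          · rw [List.getD_eq_default _ _ (by omega)]
            intro x hx
            simp at hx)
      rw [pvBackSub_allZero modulo hm1 equations.length M, hMlen]
      apply pvList_ext
      · rw [List.length_map, hblen, hMlen, List.length_replicate]
      · intro c
        by_cases hc : c < equations.length
        · have hc1 : c < ((pvBackward modulo equations.length M).map (fun row => row.getLast?.getD 0)).length := by
            rw [List.length_map, hblen, hMlen]; exact hc
          rw [List.getD_eq_getElem _ _ hc1]
          simp only [List.getElem_map]
          rw [show (pvBackward modulo equations.length M)[c]'(by rw [hblen, hMlen]; exact hc)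
                = (pvBackward modulo equations.length M).getD c []
              from (List.getD_eq_getElem _ _ (by rw [hblen, hMlen]; exact hc)).symm,
            pvAllZero_getLast _ (hbzero c)]
          rw [List.getD_eq_getElem _ _ (by rw [List.length_replicate]; exact hc)]
          simp
        · rw [List.getD_eq_default _ _ (by rw [List.length_map, hblen, hMlen]; omega),
            List.getD_eq_default _ _ (by rw [List.length_replicate]; omega)]
    · rcases Nat.eq_zero_or_pos equations.length with hn | hn
      · -- empty system: everything is []
        have heq : equations = [] := List.eq_nil_of_length_eq_zero hn
        subst heq
        rw [pvForward.eq_def] at hfwd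
        simp at hfwd
        subst hfwd
        rfl
      · have hm : modulo ≠ 0 := by
          cases hmz with
          | inl h => exact absurd h (by intro h'; rw [h'] at hn; simp at hn)
          | inr h => exact h
        have hmatlen : (equations.map (fun eq => eq.2 ++ [eq.1])).length = equations.length := by
          simp
        have hrow0 : 0 < equations.length →
            ((equations.map (fun eq => eq.2 ++ [eq.1])).getD 0 []).length = pvWidth equations + 1 := by
          intro h0
          rw [List.getD_eq_getElem _ _ (by simpa using h0)]
          simp only [List.getElem_map, List.length_append, List.length_cons, List.length_nil]
          have : equations[0] = equations.getD 0 (0, []) := (List.getD_eq_getElem _ _ h0).symm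
          rw [this]
          rfl
        have hrows : ∀ r, r < equations.length →
            pvWidth equations + 1 ≤ ((equations.map (fun eq => eq.2 ++ [eq.1])).getD r []).length := by
          intro r hr
          rw [List.getD_eq_getElem _ _ (by simpa using hr)]
          simp only [List.getElem_map, List.length_append, List.length_cons, List.length_nil]
          have := hsq _ (List.getElem_mem hr)
          omega
        have hsh := pvForward_shape modulo equations.length (pvWidth equations) hnw _ M hmatlen hrow0 hrows hfwd
        obtain ⟨hblen, hbget⟩ := pvBackward_spec modulo equations.length (pvWidth equations) hnw M hsh equations.length M
          (le_refl _) hsh.1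
          (by
            intro r hr
            conv_rhs => rw [pvRed.eq_def]
            rw [if_neg (by omega)])
          (fun r h1 h2 => absurd h1 (by omega))
        show (pvBackward modulo equations.length M).map (fun row => row.getLast?.getD 0)
            = pvX modulo equations.length M
        apply pvList_ext
        · rw [List.length_map, hblen, pvX_len modulo equations.length M hsh.1]
        · intro c
          by_cases hc : c < equations.length
          · have hc1 : c < ((pvBackward modulo equations.length M).map (fun row => row.getLast?.getD 0)).length := by
              rw [List.length_map, hblen]; exact hc
            rw [List.getD_eq_getElem _ _ hc1]
            simp only [List.getElem_map]
            rw [show (pvBackward modulo equations.length M)[c]'(by rw [hblen]; exact hc)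
                  = (pvBackward modulo equations.length M).getD c []
                from (List.getD_eq_getElem _ _ (by rw [hblen]; exact hc)).symm]
            rw [hbget c hc]
            -- last entry of the final row is the back-substitution value
            rcases Nat.lt_or_ge (pvWidth equations) equations.length with hwn | hge
            · -- width exactly n-1: the constant column is the last pivot column
              have hW : (pvFinalRow modulo equations.length (pvWidth equations) M c).getLast?.getD 0
                  = (if pvWidth equations = c then PySem.Int.mod 1 modulo else 0) := by
                rw [List.getLast?_eq_getElem?, pvFinalRow_length]
                simp only [Nat.add_sub_cancel]
                rw [← List.getD_eq_getElem?_getD, pvFinalRow_getD, if_pos (le_refl _),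
                  if_pos hwn]
              rw [hW, pvX_pivot_col modulo equations.length (pvWidth equations) (by omega) M hsh
                (equations.length - c) c rfl hc]
              by_cases hcw : c = pvWidth equations
              · rw [if_pos hcw.symm, if_pos hcw]
              · rw [if_neg (fun h => hcw h.symm), if_neg hcw]
            · have hW : (pvFinalRow modulo equations.length (pvWidth equations) M c).getLast?.getD 0
                  = pvYq modulo equations.length M c (pvWidth equations) (c+1) := by
                rw [List.getLast?_eq_getElem?, pvFinalRow_length]
                simp only [Nat.add_sub_cancel]
                rw [← List.getD_eq_getElem?_getD, pvFinalRow_getD, if_pos (le_refl _),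
                  if_neg (by omega)]
              rw [hW, pvYq_X modulo equations.length (pvWidth equations) hnw M hsh
                (equations.length - c) c rfl hc]
          · rw [List.getD_eq_default _ _ (by rw [List.length_map, hblen]; omega),
              List.getD_eq_default _ _ (by rw [pvX_len modulo equations.length M hsh.1]; omega)]
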